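-- pv_equiv track=rewrite | github.com/2921251087/CPMel-1 | CPMel(5)/tool/skin.py | rigidList
-- ===== SOURCE A (Python) =====
-- def rigidList(in_v):
--     test_max = max(in_v)
--     i_id = range(len(in_v))
--     try:
--         max_id = in_v.index(1)
--     except:
--         max_id = None
--         crr_v = None
--         for t,id in zip(in_v, i_id):
--             if crr_v is None or crr_v<t:
--                 crr_v = t
--                 max_id=id
--     return [1 if i == max_id else 0 for i in i_id]
-- ===== SOURCE B (Python) =====
-- def rigidList(in_v):
--     pos = min(range(len(in_v)), key=lambda i: (in_v[i] != 1, -in_v[i]))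
--     return [1 if i == pos else 0 for i in range(len(in_v))]
-- ===== Notes on version B (the rewrite author's own statement) =====
-- stated objective: simpler
-- what changed: Replaces A's two-stage logic (try in_v.index(1), except fall back to a manual running-argmax accumulator loop) by a single argmin over the index range under the composite lexicographic key (in_v[i] != 1, -in_v[i]), which encodes prefer-a-1-then-largest-value-then-first-position in one ordering; the one-hot list is then built from that position.
import Mathlib
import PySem

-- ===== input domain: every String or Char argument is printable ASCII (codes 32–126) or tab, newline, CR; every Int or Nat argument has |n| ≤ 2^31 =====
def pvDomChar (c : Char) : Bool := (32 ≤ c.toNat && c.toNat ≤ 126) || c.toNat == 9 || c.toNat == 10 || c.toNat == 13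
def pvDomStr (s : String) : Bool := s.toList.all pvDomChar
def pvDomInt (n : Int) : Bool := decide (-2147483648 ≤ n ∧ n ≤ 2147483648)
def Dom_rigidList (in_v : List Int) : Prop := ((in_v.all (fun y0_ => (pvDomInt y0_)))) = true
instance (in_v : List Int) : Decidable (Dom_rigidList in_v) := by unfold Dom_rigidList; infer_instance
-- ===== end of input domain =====

-- B collapses A's try/except-on-index(1) plus manual argmax loop into one argmin over indices keyed by (in_v[i] != 1, -in_v[i]); objective: simpler.


-- ===== PORT A =====
def rigidList (in_v : List Int) : List Int :=
  -- test_max = max(in_v): raises ValueError on [], excluded by Pre_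
  match PySem.List.max? in_v (fun x => x) with
  | none => []
  | some _test_max =>
    let i_id := PySem.List.pyRange 0 in_v.length 1
    let max_id : Option Int :=
      match PySem.List.index? in_v 1 with
      | some j => some (j : Int)
      | none =>
        -- crr_v = None; max_id = None; for t,id in zip(in_v, i_id): ...
        ((in_v.zip i_id).foldl
          (fun (st : Option Int × Option Int) ti =>
            match st.1 with
            | none => (some ti.1, some ti.2)
            | some c => if c < ti.1 then (some ti.1, some ti.2) else st)
          (none, none)).2
    i_id.map (fun i => if some i = max_id then 1 else 0)

-- ===== PORT B =====
-- pos = min(range(len(in_v)), key=lambda i: (in_v[i] != 1, -in_v[i]))  — min over empty range raises, excluded by Pre_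
def rigidList_alt (in_v : List Int) : List Int :=
  match PySem.List.min2? (PySem.List.pyRange 0 in_v.length 1)
      (fun i => PySem.List.pyGetD in_v i 0 != 1)
      (fun i => -(PySem.List.pyGetD in_v i 0)) with
  | none => []
  | some pos => (PySem.List.pyRange 0 in_v.length 1).map (fun i => if i = pos then 1 else 0)

-- ===== PRECONDITION & SPEC =====
-- Pre_ excludes only the empty list, on which Python A raises ValueError (max of empty sequence); B also raises there (min of empty range).
def Pre_rigidList (in_v : List Int) : Prop := in_v ≠ []
instance (in_v : List Int) : Decidable (Pre_rigidList in_v) := by unfold Pre_rigidList; infer_instance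
def pvWitness_rigidList : List Int := [3, 1, 2]
def Spec_rigidList (in_v : List Int) (out : List Int) : Prop := out = rigidList_alt in_v
instance (in_v : List Int) (out : List Int) : Decidable (Spec_rigidList in_v out) := by unfold Spec_rigidList; infer_instance

-- ===== CLAIM =====
def Claim_equal_rigidList : Prop := ∀ (in_v : List Int), Dom_rigidList in_v → Pre_rigidList in_v → Spec_rigidList in_v (rigidList in_v)

-- ===== LEMMAS AND PROOFS =====

-- the position both programs mark: first index of 1 if present, else first index of the maximum
def tgtV : List Int → Int
  | [] => 0
  | h :: t => if (1 : Int) ∈ h :: t then 1 else t.foldl max h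

def posN (v : List Int) : Nat := v.idxOf (tgtV v)

theorem tgtV_mem (v : List Int) (h : v ≠ []) : tgtV v ∈ v := by
  match v with
  | h :: t =>
    unfold tgtV
    by_cases h1 : (1 : Int) ∈ h :: t
    · simp only [h1, if_true]
    · simp only [h1, if_false]
      rcases PySem.List.foldl_max_mem t h with he | hm
      · simp [he]
      · exact List.mem_cons_of_mem _ hm

theorem getD_posN (v : List Int) (h : v ≠ []) : v.getD (posN v) 0 = tgtV v := by
  have hm := tgtV_mem v h
  unfold posN
  rw [List.getD_eq_getElem?_getD, List.getElem?_eq_getElem (List.idxOf_lt_length_of_mem hm)]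
  simp [List.getElem_idxOf]

-- min2?'s fold step, named so its applications reduce by rfl
def mstep {α : Type} (k1 : α → Bool) (k2 : α → Int) (acc : Option α) (x : α) : Option α :=
  match acc with
  | none => some x
  | some m => if (decide (k1 x < k1 m) || !decide (k1 m < k1 x) && decide (k2 x < k2 m)) then some x else some m

theorem min2?_eq_foldl_mstep {α : Type} (k1 : α → Bool) (k2 : α → Int) (xs : List α) :
    PySem.List.min2? xs k1 k2 = xs.foldl (mstep k1 k2) none := by
  unfold PySem.List.min2?
  apply PySem.List.foldl_congr_mem
  intro acc x _
  cases acc <;> rfl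

theorem lexLt_trans {b1 b2 b3 : Bool} {i1 i2 i3 : Int}
    (h1 : (decide (b1 < b2) || !decide (b2 < b1) && decide (i1 < i2)) = true)
    (h2 : (decide (b2 < b3) || !decide (b3 < b2) && decide (i2 < i3)) = true) :
    (decide (b1 < b3) || !decide (b3 < b1) && decide (i1 < i3)) = true := by
  revert h1 h2; cases b1 <;> cases b2 <;> cases b3 <;> simp <;> omega

theorem lexLt_neg_trans {b1 b2 b3 : Bool} {i1 i2 i3 : Int}
    (h1 : ¬ (decide (b1 < b2) || !decide (b2 < b1) && decide (i1 < i2)) = true)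
    (h2 : ¬ (decide (b2 < b3) || !decide (b3 < b2) && decide (i2 < i3)) = true) :
    ¬ (decide (b1 < b3) || !decide (b3 < b1) && decide (i1 < i3)) = true := by
  revert h1 h2; cases b1 <;> cases b2 <;> cases b3 <;> simp <;> omega

theorem foldl_mstep_some {α : Type} (k1 : α → Bool) (k2 : α → Int) (xs : List α) : ∀ (z : α),
    xs.foldl (mstep k1 k2) (some z)
    = match xs.foldl (mstep k1 k2) none with
      | none => some z
      | some m => if (decide (k1 m < k1 z) || !decide (k1 z < k1 m) && decide (k2 m < k2 z)) then some m else some z := by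
  induction xs with
  | nil => intro z; rfl
  | cons a l ih =>
    intro z
    simp only [List.foldl_cons]
    have ha : mstep k1 k2 none a = some a := rfl
    have hz : mstep k1 k2 (some z) a
        = if (decide (k1 a < k1 z) || !decide (k1 z < k1 a) && decide (k2 a < k2 z)) then some a else some z := rfl
    rw [ha, hz]
    by_cases haz : (decide (k1 a < k1 z) || !decide (k1 z < k1 a) && decide (k2 a < k2 z)) = true
    · rw [if_pos haz, ih a]
      cases hl : l.foldl (mstep k1 k2) none with
      | none => simp only; rw [if_pos haz]
      | some m =>
        simp only
        by_cases hma : (decide (k1 m < k1 a) || !decide (k1 a < k1 m) && decide (k2 m < k2 a)) = true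
        · rw [if_pos hma]; simp only; rw [if_pos (lexLt_trans hma haz)]
        · rw [if_neg hma]; simp only; rw [if_pos haz]
    · rw [if_neg haz, ih z, ih a]
      cases hl : l.foldl (mstep k1 k2) none with
      | none => simp only; rw [if_neg haz]
      | some m =>
        simp only
        by_cases hma : (decide (k1 m < k1 a) || !decide (k1 a < k1 m) && decide (k2 m < k2 a)) = true
        · rw [if_pos hma]
        · rw [if_neg hma]; simp only; rw [if_neg haz, if_neg (lexLt_neg_trans hma haz)]

theorem foldl_mstep_map {α β : Type} (g : α → β) (k1 : β → Bool) (k2 : β → Int) (l : List α) :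
    ∀ (acc : Option α),
    (l.map g).foldl (mstep k1 k2) (acc.map g)
      = (l.foldl (mstep (fun x => k1 (g x)) (fun x => k2 (g x))) acc).map g := by
  induction l with
  | nil => intro acc; rfl
  | cons a l ih =>
    intro acc
    simp only [List.map_cons, List.foldl_cons]
    cases acc with
    | none => exact ih (some a)
    | some m =>
      have h : mstep k1 k2 (some (g m)) (g a)
          = Option.map g (mstep (fun x => k1 (g x)) (fun x => k2 (g x)) (some m) a) := by
        unfold mstep
        by_cases hc : (decide (k1 (g a) < k1 (g m)) || !decide (k1 (g m) < k1 (g a)) && decide (k2 (g a) < k2 (g m))) = true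
        · simp only [hc, if_true]; rfl
        · simp only [hc]; rfl
      rw [show (Option.map g (some m)) = some (g m) from rfl, h]
      exact ih _

theorem foldl_max_init (l : List Int) : ∀ x y : Int, l.foldl max (max x y) = max x (l.foldl max y) := by
  induction l with
  | nil => intro x y; rfl
  | cons a l ih =>
    intro x y
    simp only [List.foldl_cons]
    rw [show max (max x y) a = max x (max y a) from max_assoc x y a]
    exact ih x (max y a)

theorem tgtV_of_mem (t : List Int) (h1 : (1 : Int) ∈ t) : tgtV t = 1 := by
  match t with
  | a :: t' => simp [tgtV, h1]

theorem tgtV_ne_one (t : List Int) (ht : t ≠ []) (h1 : (1 : Int) ∉ t) : tgtV t ≠ 1 := by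
  intro he
  exact h1 (he ▸ tgtV_mem t ht)

theorem tgtV_cons_not_mem (h : Int) (t : List Int) (hn : (1 : Int) ∉ h :: t) (ht : t ≠ []) :
    tgtV (h :: t) = max h (tgtV t) := by
  match t with
  | a :: t' =>
    have h1t : (1 : Int) ∉ a :: t' := fun hm => hn (List.mem_cons_of_mem _ hm)
    unfold tgtV
    simp only [hn, if_false, h1t, List.foldl_cons]
    exact foldl_max_init t' h a

theorem posN_cons_self (h : Int) (t : List Int) (he : tgtV (h :: t) = h) : posN (h :: t) = 0 := by
  unfold posN
  rw [he, List.idxOf_cons_self]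

theorem rMin_spec (v : List Int) (hv : v ≠ []) :
    (List.range v.length).foldl
        (mstep (fun j => v.getD j 0 != 1) (fun j => -(v.getD j 0))) none
      = some (posN v) := by
  induction v with
  | nil => exact absurd rfl hv
  | cons h t ih =>
    rw [List.length_cons, List.range_succ_eq_map, List.foldl_cons]
    have h0 : mstep (fun j => (h :: t).getD j 0 != 1) (fun j => -((h :: t).getD j 0)) none 0 = some 0 := rfl
    rw [h0, foldl_mstep_some]
    have hmap := foldl_mstep_map Nat.succ
      (fun j => (h :: t).getD j 0 != 1) (fun j => -((h :: t).getD j 0)) (List.range t.length) none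
    simp only [Option.map_none] at hmap
    rw [hmap]
    have hk1 : (fun x => ((h :: t).getD (Nat.succ x) 0 != 1)) = (fun j => t.getD j 0 != 1) := by
      funext x; simp [Nat.succ_eq_add_one]
    have hk2 : (fun x => -((h :: t).getD (Nat.succ x) 0)) = (fun j => -(t.getD j 0)) := by
      funext x; simp [Nat.succ_eq_add_one]
    rw [hk1, hk2]
    cases t with
    | nil =>
      simp only [List.length_nil, List.range_zero, List.foldl_nil, Option.map_none]
      by_cases hh : h = 1
      · simp [posN, tgtV, hh]
      · have h1h : ¬ ((1:Int) = h) := fun e => hh e.symm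
        simp [posN, tgtV, h1h]
    | cons a t' =>
      have htne : (a :: t') ≠ [] := List.cons_ne_nil a t'
      rw [ih htne, Option.map_some]
      set t := a :: t' with hts
      set p := posN t with hps
      have hgd : t.getD p 0 = tgtV t := getD_posN t htne
      have hgd0 : (h :: t).getD 0 0 = h := rfl
      have hgdp : (h :: t).getD (Nat.succ p) 0 = tgtV t := by
        rw [Nat.succ_eq_add_one, List.getD_cons_succ, hgd]
      simp only [hgdp, hgd0]
      by_cases hh : h = 1
      · have hmem : (1 : Int) ∈ h :: t := by rw [← hh]; exact List.mem_cons_self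
        have hp0 : posN (h :: t) = 0 := by
          apply posN_cons_self
          rw [tgtV_of_mem _ hmem, hh]
        rw [hp0, hh]
        by_cases h1t : (1 : Int) ∈ t
        · rw [tgtV_of_mem t h1t]
          simp
        · have hne1 : tgtV t ≠ 1 := tgtV_ne_one t htne h1t
          have hbt : (tgtV t != 1) = true := by simp [bne, hne1]
          simp [hbt]
      · by_cases h1t : (1 : Int) ∈ t
        · have hT : tgtV t = 1 := tgtV_of_mem t h1t
          have hh' : (h != 1) = true := by simp [bne, hh]
          have hcond : ((decide ((tgtV t != 1) < (h != 1)) ||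
              !decide ((h != 1) < (tgtV t != 1)) && decide (-(tgtV t) < -h))) = true := by
            simp [hT, hh']
          rw [if_pos hcond]
          have hmem : (1 : Int) ∈ h :: t := List.mem_cons_of_mem _ h1t
          unfold posN
          rw [tgtV_of_mem _ hmem, List.idxOf_cons_ne t hh, hps]
          unfold posN
          rw [hT]
        · have hn : (1 : Int) ∉ h :: t := by
            intro hm
            rcases List.mem_cons.mp hm with he | hm'
            · exact hh he.symm
            · exact h1t hm'
          have hne1 : tgtV t ≠ 1 := tgtV_ne_one t htne h1t
          have hTc : tgtV (h :: t) = max h (tgtV t) := tgtV_cons_not_mem h t hn htne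
          by_cases hlt : h < tgtV t
          · have hcond : ((decide ((tgtV t != 1) < (h != 1)) ||
                !decide ((h != 1) < (tgtV t != 1)) && decide (-(tgtV t) < -h))) = true := by
              have : (tgtV t != 1) = true := by simp [bne, hne1]
              have hh' : (h != 1) = true := by simp [bne, hh]
              simp [this, hh', hlt]
            rw [if_pos hcond]
            have hmax : tgtV (h :: t) = tgtV t := by rw [hTc]; omega
            unfold posN
            rw [hmax, List.idxOf_cons_ne t (by omega : h ≠ tgtV t), hps]
            unfold posN
            rfl
          · have hcond : ¬ ((decide ((tgtV t != 1) < (h != 1)) ||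
                !decide ((h != 1) < (tgtV t != 1)) && decide (-(tgtV t) < -h))) = true := by
              have h1 : (tgtV t != 1) = true := by simp [bne, hne1]
              have hh' : (h != 1) = true := by simp [bne, hh]
              simp [h1, hh']
              omega
            rw [if_neg hcond]
            have hp0 : posN (h :: t) = 0 := by
              apply posN_cons_self
              rw [hTc]; omega
            rw [hp0]

theorem B_eq (v : List Int) (hv : v ≠ []) :
    rigidList_alt v
      = (PySem.List.pyRange 0 v.length 1).map (fun i => if i = ((posN v : Nat) : Int) then 1 else 0) := by
  unfold rigidList_alt
  rw [PySem.List.pyRange_zero_natCast, min2?_eq_foldl_mstep]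
  have hmap := foldl_mstep_map (fun (k : Nat) => (k : Int))
    (fun i => PySem.List.pyGetD v i 0 != 1) (fun i => -(PySem.List.pyGetD v i 0))
    (List.range v.length) none
  simp only [Option.map_none] at hmap
  rw [hmap]
  have hk1 : (fun x : Nat => (PySem.List.pyGetD v ((x : Nat) : Int) 0 != 1)) = (fun j => v.getD j 0 != 1) := by
    funext x; simp
  have hk2 : (fun x : Nat => -(PySem.List.pyGetD v ((x : Nat) : Int) 0)) = (fun j => -(v.getD j 0)) := by
    funext x; simp
  rw [hk1, hk2, rMin_spec v hv, Option.map_some]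

-- A's argmax loop over the tail, started with current best c at index i, next index k:
-- it returns the running max and (first strictly-improving position = first index of the max past c).
theorem loopA_spec (r : List Int) : ∀ (c i k : Int),
    (r.zip (PySem.List.pyRange k (k + r.length) 1)).foldl
      (fun (st : Option Int × Option Int) ti =>
        match st.1 with
        | none => (some ti.1, some ti.2)
        | some c => if c < ti.1 then (some ti.1, some ti.2) else st)
      (some c, some i)
    = (some (r.foldl max c),
       some (if r.foldl max c ≤ c then i else k + (r.idxOf (r.foldl max c) : Int))) := by
  induction r with
  | nil => intro c i k; simp
  | cons t r ih =>
    intro c i k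
    rw [show k + ((t :: r).length : Int) = (k+1) + r.length by push_cast [List.length_cons]; ring,
        PySem.List.pyRange_one_cons (by omega)]
    simp only [List.zip_cons_cons, List.foldl_cons]
    have hle : ∀ (a : List Int) (x : Int), x ≤ a.foldl max x := fun a x =>
      (PySem.List.le_foldl_max a x).1
    by_cases h : c < t
    · simp only [h, if_true]
      rw [ih t k (k+1), show max c t = t by omega]
      have htM : t ≤ r.foldl max t := hle r t
      simp only [Prod.mk.injEq, Option.some.injEq, true_and]
      by_cases h2 : r.foldl max t ≤ t
      · have he : r.foldl max t = t := le_antisymm h2 htM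
        have h3 : ¬ (r.foldl max t ≤ c) := by omega
        simp [h2, h3, List.idxOf_cons_eq r he.symm]
      · have hne : t ≠ r.foldl max t := by omega
        have h3 : ¬ (r.foldl max t ≤ c) := by omega
        rw [List.idxOf_cons_ne r hne]
        simp only [h2, h3, if_false]
        push_cast
        ring_nf
    · simp only [h, if_false]
      rw [ih c i (k+1), show max c t = c by omega]
      by_cases h2 : r.foldl max c ≤ c
      · simp [h2]
      · have hne : t ≠ r.foldl max c := by
          have := hle r c; omega
        rw [List.idxOf_cons_ne r hne]
        simp only [h2, if_false, Prod.mk.injEq, Option.some.injEq, true_and]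
        push_cast
        ring_nf

theorem idxOf?_eq_some_of_mem (l : List Int) (a : Int) (h : a ∈ l) :
    List.idxOf? a l = some (List.idxOf a l) := by
  obtain ⟨k, hk⟩ := Option.isSome_iff_exists.mp (List.isSome_idxOf?.mpr h)
  rw [hk, List.idxOf_eq_getD_idxOf?, hk]
  rfl

theorem A_eq (v : List Int) (hv : v ≠ []) :
    rigidList v
      = (PySem.List.pyRange 0 v.length 1).map (fun i => if i = ((posN v : Nat) : Int) then 1 else 0) := by
  unfold rigidList
  obtain ⟨h, rest, rfl⟩ : ∃ h rest, v = h :: rest := by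
    cases v with
    | nil => exact absurd rfl hv
    | cons a l => exact ⟨a, l, rfl⟩
  rw [PySem.List.max?_id_cons]
  simp only
  set M := rest.foldl max h with hM
  have hhM : h ≤ M := (PySem.List.le_foldl_max rest h).1
  by_cases hone : (1 : Int) ∈ h :: rest
  · rw [show PySem.List.index? (h :: rest) 1 = some (List.idxOf 1 (h :: rest)) by
      rw [PySem.List.index?_eq_idxOf?]; exact idxOf?_eq_some_of_mem _ _ hone]
    simp only
    apply List.map_congr_left
    intro x _
    simp [posN, tgtV_of_mem _ hone]
  · rw [(PySem.List.index?_eq_none_iff (h :: rest) 1).mpr hone]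
    simp only
    have hpos : posN (h :: rest) = List.idxOf M (h :: rest) := by
      unfold posN
      rw [show tgtV (h :: rest) = if (1 : Int) ∈ h :: rest then 1 else rest.foldl max h from rfl,
          if_neg hone, ← hM]
    rw [show ((h :: rest).length : Int) = 0 + ((h :: rest).length : Int) by ring,
        PySem.List.pyRange_one_cons (a := 0) (b := 0 + ((h :: rest).length : Int))
          (by simp)]
    simp only [List.zip_cons_cons, List.foldl_cons, zero_add]
    rw [show ((h :: rest).length : Int) = 1 + (rest.length : Int) by push_cast [List.length_cons]; ring,
        loopA_spec rest h 0 1, ← hM]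
    by_cases h2 : M ≤ h
    · have he : h = M := le_antisymm hhM h2
      have hidx : List.idxOf M (h :: rest) = 0 := by
        rw [← he, List.idxOf_cons_self]
      apply List.map_congr_left
      intro x _
      simp [h2, hpos, hidx]
    · have hne : h ≠ M := by omega
      have hidx : List.idxOf M (h :: rest) = (List.idxOf M rest).succ :=
        List.idxOf_cons_ne rest hne
      apply List.map_congr_left
      intro x _
      simp only [h2, if_false, Option.some.injEq, hpos, hidx]
      rw [show (1 : Int) + (List.idxOf M rest : Int) = (((List.idxOf M rest).succ : Nat) : Int) by push_cast; ring]

-- ===== VERDICT (by name: the statement is the Claim_ definition above) =====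
theorem rigidList_spec : Claim_equal_rigidList := by
  intro in_v _hdom hpre
  unfold Spec_rigidList
  rw [A_eq in_v hpre, B_eq in_v hpre]
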